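-- pv_equiv track=rewrite | github.com/zhiyufan/Verifix | srcU/Verifix/Repair/RepairFormula.py | get_repair_pairs
-- ===== SOURCE A (Python) =====
-- def get_repair_pairs(repair_list, cp=[], init_depth=0, max_depth=3):
--     if init_depth >= max_depth:
--         return [cp]
--     repairs = []
--     for i in repair_list[init_depth]:
--         for li in get_repair_pairs(repair_list, [i], init_depth + 1, max_depth=max_depth):
--             repairs.append(cp + li)
--     return repairs
-- ===== SOURCE B (Python) =====
-- def get_repair_pairs(repair_list, cp=[], init_depth=0, max_depth=3):
--     # collect the levels, stopping (like A) as soon as a level is empty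
--     levels = []
--     for d in range(init_depth, max_depth):
--         lvl = repair_list[d]
--         if not lvl:
--             return []
--         levels.append(lvl)
--     # total number of tuples = product of level sizes
--     total = 1
--     for lvl in levels:
--         total *= len(lvl)
--     # mixed-radix decoding: the k-th tuple's digits, least-significant level last
--     out = []
--     for k in range(total):
--         digits = []
--         rem = k
--         for lvl in reversed(levels):
--             rem, r = divmod(rem, len(lvl))
--             digits.append(lvl[r])
--         out.append(cp + digits[::-1])
--     return out
-- ===== Notes on version B (the rewrite author's own statement) =====
-- stated objective: alternative
-- what changed: Replaced A's per-element recursion by a mixed-radix enumeration: collect the levels once, compute total = product of level sizes, and build the k-th tuple for k in range(total) by divmod decoding of k into one index per level.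
import Mathlib
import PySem

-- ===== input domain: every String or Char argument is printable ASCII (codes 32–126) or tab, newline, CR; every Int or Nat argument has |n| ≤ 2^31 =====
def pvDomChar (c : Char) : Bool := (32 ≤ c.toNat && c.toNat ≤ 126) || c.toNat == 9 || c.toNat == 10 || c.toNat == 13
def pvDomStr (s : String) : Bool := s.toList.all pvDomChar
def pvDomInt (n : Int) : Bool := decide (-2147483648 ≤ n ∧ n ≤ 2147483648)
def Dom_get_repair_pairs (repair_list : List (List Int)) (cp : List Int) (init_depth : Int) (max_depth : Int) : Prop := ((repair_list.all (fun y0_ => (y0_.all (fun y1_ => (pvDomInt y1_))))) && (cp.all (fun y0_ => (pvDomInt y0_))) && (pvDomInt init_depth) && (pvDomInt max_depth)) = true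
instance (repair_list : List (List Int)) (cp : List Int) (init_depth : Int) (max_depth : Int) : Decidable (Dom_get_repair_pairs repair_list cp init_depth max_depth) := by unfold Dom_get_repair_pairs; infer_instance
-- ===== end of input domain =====

-- B replaces A's per-element recursion by a mixed-radix enumeration: collect the levels,
-- multiply their sizes, and decode each k in range(total) into one index per level
-- (alternative decomposition, same cost).

-- ===== PORT A =====
-- Recursion on the fuel (max_depth - init_depth).toNat; when repair_list[d] is out of
-- range (Python IndexError, excluded by Pre_) the port returns [].
def pvGoA (repair_list : List (List Int)) (cp : List Int) (d : Int) : Nat → List (List Int)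
  | 0 => [cp]
  | fuel + 1 =>
    match PySem.List.pyGet? repair_list d with
    | none => []  -- IndexError in Python; outside Pre_
    | some lvl =>
      lvl.foldl (fun repairs i =>
        (pvGoA repair_list [i] (d + 1) fuel).foldl (fun repairs li => repairs ++ [cp ++ li]) repairs) []

def get_repair_pairs (repair_list : List (List Int)) (cp : List Int) (init_depth : Int) (max_depth : Int) : List (List Int) :=
  pvGoA repair_list cp init_depth (max_depth - init_depth).toNat

-- ===== PORT B =====
-- B's first loop: collect repair_list[d] for d in range(init_depth, max_depth);
-- `none` = IndexError (outside Pre_), `some none` = B's early `return []` on an empty level.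
def pvLevelsB (repair_list : List (List Int)) (d : Int) (acc : List (List Int)) : Nat → Option (Option (List (List Int)))
  | 0 => some (some acc)
  | fuel + 1 =>
    match PySem.List.pyGet? repair_list d with
    | none => none  -- IndexError in Python; outside Pre_
    | some lvl =>
      if lvl = [] then some none
      else pvLevelsB repair_list (d + 1) (acc ++ [lvl]) fuel

-- B's second loop: total = product of the level sizes.
def pvTotalB (levels : List (List Int)) : Int :=
  levels.foldl (fun t lvl => t * (lvl.length : Int)) 1

-- B's inner loop: divmod-decode k into digits over reversed(levels), then digits[::-1].
-- lvl[r] has 0 ≤ r < len(lvl) here, so the `.getD 0` total form never fires its default.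
def pvDecodeB (levels : List (List Int)) (k : Int) : List Int :=
  (levels.reverse.foldl (fun (st : Int × List Int) lvl =>
      (PySem.Int.floordiv st.1 (lvl.length : Int),
       st.2 ++ [(PySem.List.pyGet? lvl (PySem.Int.mod st.1 (lvl.length : Int))).getD 0])) (k, [])).2.reverse

def get_repair_pairs_alt (repair_list : List (List Int)) (cp : List Int) (init_depth : Int) (max_depth : Int) : List (List Int) :=
  match pvLevelsB repair_list init_depth [] (max_depth - init_depth).toNat with
  | none => []  -- IndexError in Python; outside Pre_
  | some none => []
  | some (some levels) =>
    (PySem.List.pyRange 0 (pvTotalB levels) 1).map (fun k => cp ++ pvDecodeB levels k)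

-- ===== PRECONDITION & SPEC =====
-- Pre_ excludes exactly the inputs where Python A raises IndexError: A indexes depths
-- init_depth, init_depth+1, ... while each level is nonempty, so it raises iff
-- init_depth itself is out of range, or depth len(repair_list) (the first possible
-- out-of-range depth) lies below max_depth and every level from init_depth up to it
-- is nonempty (no early `[]` stops the recursion first); "some touched level is empty"
-- is phrased as list membership of [] so deciding Pre_ is linear in the input.
def Pre_get_repair_pairs (repair_list : List (List Int)) (cp : List Int) (init_depth : Int) (max_depth : Int) : Prop :=
  init_depth < max_depth →
    (PySem.Raise.InRange repair_list.length init_depth ∧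
     ((repair_list.length : Int) < max_depth →
       ((0 ≤ init_depth → [] ∈ repair_list.drop init_depth.toNat) ∧
        (init_depth < 0 → [] ∈ repair_list))))
instance (repair_list : List (List Int)) (cp : List Int) (init_depth : Int) (max_depth : Int) : Decidable (Pre_get_repair_pairs repair_list cp init_depth max_depth) := by unfold Pre_get_repair_pairs; infer_instance

def pvWitness_get_repair_pairs : List (List Int) × List Int × Int × Int := ([[1, 2], [3]], [0], 0, 2)

def Spec_get_repair_pairs (repair_list : List (List Int)) (cp : List Int) (init_depth : Int) (max_depth : Int) (out : List (List Int)) : Prop := out = get_repair_pairs_alt repair_list cp init_depth max_depth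
instance (repair_list : List (List Int)) (cp : List Int) (init_depth : Int) (max_depth : Int) (out : List (List Int)) : Decidable (Spec_get_repair_pairs repair_list cp init_depth max_depth out) := by unfold Spec_get_repair_pairs; infer_instance

-- ===== CLAIM (what is proved, stated in full; the proofs are below) =====
def Claim_equal_get_repair_pairs : Prop := ∀ (repair_list : List (List Int)) (cp : List Int) (init_depth : Int) (max_depth : Int), Dom_get_repair_pairs repair_list cp init_depth max_depth → Pre_get_repair_pairs repair_list cp init_depth max_depth → Spec_get_repair_pairs repair_list cp init_depth max_depth (get_repair_pairs repair_list cp init_depth max_depth)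

-- ===== LEMMAS AND PROOFS =====

-- Reference Cartesian product of a list of levels, most significant level first.
def pvProd : List (List Int) → List (List Int)
  | [] => [[]]
  | lvl :: rest => lvl.flatMap (fun i => (pvProd rest).map (i :: ·))

-- A's double foldl-append is a flatMap of maps.
theorem pvGoA_succ (repair_list : List (List Int)) (cp : List Int) (d : Int) (fuel : Nat) :
    pvGoA repair_list cp d (fuel + 1) =
      match PySem.List.pyGet? repair_list d with
      | none => []
      | some lvl => lvl.flatMap (fun i => (pvGoA repair_list [i] (d + 1) fuel).map (fun li => cp ++ li)) := by
  cases h : PySem.List.pyGet? repair_list d with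
  | none => simp [pvGoA, h]
  | some lvl =>
    simp only [pvGoA, h]
    have h1 : ∀ (i : Int) (init : List (List Int)),
        (pvGoA repair_list [i] (d + 1) fuel).foldl (fun repairs li => repairs ++ [cp ++ li]) init
          = init ++ (pvGoA repair_list [i] (d + 1) fuel).map (fun li => cp ++ li) := by
      intro i init
      exact PySem.List.foldl_append_singleton_eq_map _ _ _
    simp only [h1]
    rw [PySem.List.foldl_append_eq_flatMap]
    simp

-- A's result with prefix cp is the cp-prefixed version of its result with prefix [].
theorem pvGoA_map (repair_list : List (List Int)) (cp : List Int) (d : Int) (fuel : Nat) :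
    pvGoA repair_list cp d fuel = (pvGoA repair_list [] d fuel).map (fun li => cp ++ li) := by
  cases fuel with
  | zero => simp [pvGoA]
  | succ fuel =>
    rw [pvGoA_succ, pvGoA_succ]
    cases PySem.List.pyGet? repair_list d with
    | none => simp
    | some lvl => simp [List.map_flatMap]

-- B's level collector with any accumulator = the collector from [] with acc prepended.
theorem pvLevelsB_acc (repair_list : List (List Int)) (fuel : Nat) :
    ∀ (d : Int) (acc : List (List Int)),
      pvLevelsB repair_list d acc fuel
        = (pvLevelsB repair_list d [] fuel).map (Option.map (acc ++ ·)) := by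
  induction fuel with
  | zero => intro d acc; simp [pvLevelsB]
  | succ fuel ih =>
    intro d acc
    simp only [pvLevelsB]
    cases PySem.List.pyGet? repair_list d with
    | none => simp
    | some lvl =>
      by_cases he : lvl = []
      · simp [he]
      · simp only [if_neg he]
        rw [ih (d + 1) (acc ++ [lvl]), ih (d + 1) ([] ++ [lvl])]
        simp [Option.map_map, Function.comp_def]

-- Core: under the reachability condition, B's collector never hits IndexError, and A's
-- recursion computes [] (early empty level) or the Cartesian product of the levels.
theorem pvCoreAB (repair_list : List (List Int)) : ∀ (fuel : Nat) (d : Int),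
    (∀ k : Nat, k < fuel →
       (∀ j : Nat, j < k → (PySem.List.pyGet? repair_list (d + (j : Int))).getD [] ≠ []) →
       (PySem.List.pyGet? repair_list (d + (k : Int))).isSome = true) →
    (pvLevelsB repair_list d [] fuel = some none ∧ pvGoA repair_list [] d fuel = []) ∨
    (∃ L, pvLevelsB repair_list d [] fuel = some (some L) ∧
          pvGoA repair_list [] d fuel = pvProd L ∧ ∀ l ∈ L, l ≠ []) := by
  intro fuel
  induction fuel with
  | zero =>
    intro d _
    right; exact ⟨[], rfl, by simp [pvGoA, pvProd], by simp⟩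
  | succ fuel ih =>
    intro d hin
    have h0 := hin 0 (Nat.succ_pos fuel) (by intro j hj; omega)
    rw [Option.isSome_iff_exists] at h0
    obtain ⟨lvl, hlvl⟩ := h0
    rw [show d + ((0 : Nat) : Int) = d by simp] at hlvl
    by_cases he : lvl = []
    · left
      constructor
      · simp [pvLevelsB, hlvl, he]
      · rw [pvGoA_succ]; simp [hlvl, he]
    · have hin' : ∀ k : Nat, k < fuel →
          (∀ j : Nat, j < k → (PySem.List.pyGet? repair_list ((d + 1) + (j : Int))).getD [] ≠ []) →
          (PySem.List.pyGet? repair_list ((d + 1) + (k : Int))).isSome = true := by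
        intro k hk hp
        have hmain := hin (k + 1) (by omega) ?_
        · rw [show d + ((k + 1 : Nat) : Int) = (d + 1) + (k : Int) by push_cast; ring] at hmain
          exact hmain
        · intro j hj
          cases j with
          | zero =>
            rw [show d + ((0 : Nat) : Int) = d by simp, hlvl]
            simpa using he
          | succ j =>
            have hpj := hp j (by omega)
            rw [show d + ((j + 1 : Nat) : Int) = (d + 1) + (j : Int) by push_cast; ring]
            exact hpj
      rcases ih (d + 1) hin' with ⟨hL, hA⟩ | ⟨L, hL, hA, hne⟩
      · left
        constructor
        · simp only [pvLevelsB, hlvl, if_neg he]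
          rw [pvLevelsB_acc, hL]; rfl
        · rw [pvGoA_succ]; simp only [hlvl]
          have hz : ∀ i : Int, pvGoA repair_list [i] (d + 1) fuel = [] := by
            intro i; rw [pvGoA_map, hA]; rfl
          simp [hz]
      · right
        refine ⟨lvl :: L, ?_, ?_, ?_⟩
        · simp only [pvLevelsB, hlvl, if_neg he]
          rw [pvLevelsB_acc, hL]; rfl
        · rw [pvGoA_succ]; simp only [hlvl]
          have hi : ∀ i : Int, pvGoA repair_list [i] (d + 1) fuel = (pvProd L).map (i :: ·) := by
            intro i; rw [pvGoA_map, hA]; simp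
          simp [hi, pvProd, Function.comp_def]
        · intro l hl
          rcases List.mem_cons.mp hl with h | h
          · exact h ▸ he
          · exact hne l h

-- pvTotalB is the (cast) product of the level lengths.
theorem pvTotalB_eq (L : List (List Int)) :
    pvTotalB L = (((L.map List.length).prod : Nat) : Int) := by
  have aux : ∀ (M : List (List Int)) (a : Int),
      M.foldl (fun t lvl => t * (lvl.length : Int)) a = a * (((M.map List.length).prod : Nat) : Int) := by
    intro M
    induction M with
    | nil => intro a; simp
    | cons x M ihM => intro a; simp only [List.foldl_cons, ihM, List.map_cons, List.prod_cons]; push_cast; ring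
  simpa [pvTotalB] using aux L 1

-- pvProd grows on the right by appending one digit from the new last level.
theorem pvProd_append (L : List (List Int)) (last : List Int) :
    pvProd (L ++ [last]) = (pvProd L).flatMap (fun t => last.map (fun j => t ++ [j])) := by
  induction L with
  | nil => simp [pvProd, ← List.map_eq_flatMap]
  | cons x L ihL =>
    simp only [List.cons_append, pvProd, ihL]
    simp [List.map_flatMap, List.flatMap_map, List.flatMap_assoc, List.map_map, Function.comp_def]

-- The decode loop's digit list only accumulates: state (q, ds) = state (q, []) with ds prepended.
theorem pvDecodeB_loop_acc (xs : List (List Int)) : ∀ (q : Int) (ds : List Int),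
    xs.foldl (fun (st : Int × List Int) lvl =>
        (PySem.Int.floordiv st.1 (lvl.length : Int),
         st.2 ++ [(PySem.List.pyGet? lvl (PySem.Int.mod st.1 (lvl.length : Int))).getD 0])) (q, ds)
      = ((xs.foldl (fun (st : Int × List Int) lvl =>
            (PySem.Int.floordiv st.1 (lvl.length : Int),
             st.2 ++ [(PySem.List.pyGet? lvl (PySem.Int.mod st.1 (lvl.length : Int))).getD 0])) (q, [])).1,
         ds ++ (xs.foldl (fun (st : Int × List Int) lvl =>
            (PySem.Int.floordiv st.1 (lvl.length : Int),
             st.2 ++ [(PySem.List.pyGet? lvl (PySem.Int.mod st.1 (lvl.length : Int))).getD 0])) (q, [])).2) := by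
  induction xs with
  | nil => intro q ds; simp
  | cons x xs ihx =>
    intro q ds
    simp only [List.foldl_cons, List.nil_append]
    rw [ihx (PySem.Int.floordiv q (x.length : Int))
          (ds ++ [(PySem.List.pyGet? x (PySem.Int.mod q (x.length : Int))).getD 0]),
        ihx (PySem.Int.floordiv q (x.length : Int))
          [(PySem.List.pyGet? x (PySem.Int.mod q (x.length : Int))).getD 0]]
    simp

-- Decoding against L ++ [last]: last digit from k % len(last), prefix from k // len(last).
theorem pvDecodeB_append (L : List (List Int)) (last : List Int) (k : Int) :
    pvDecodeB (L ++ [last]) k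
      = pvDecodeB L (PySem.Int.floordiv k (last.length : Int))
          ++ [(PySem.List.pyGet? last (PySem.Int.mod k (last.length : Int))).getD 0] := by
  unfold pvDecodeB
  rw [show (L ++ [last]).reverse = last :: L.reverse by simp]
  simp only [List.foldl_cons, List.nil_append]
  rw [pvDecodeB_loop_acc]
  simp

-- Splitting range(T*m) into T blocks of m.
theorem pvRangeMul {α : Type} (T m : Nat) (f : Int → α) :
    (PySem.List.pyRange 0 (((T * m : Nat) : Int)) 1).map f
      = (List.range T).flatMap
          (fun t : Nat => (List.range m).map (fun j : Nat => f ((t : Int) * (m : Int) + (j : Int)))) := by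
  rw [PySem.List.pyRange_zero_natCast, List.map_map]
  induction T with
  | zero => simp
  | succ T ihT =>
    rw [Nat.succ_mul, List.range_add, List.map_append, ihT, List.range_succ, List.flatMap_append]
    congr 1
    simp only [List.flatMap_singleton, List.map_map]
    apply List.map_congr_left
    intro j hj
    have hc : ((T * m + j : Nat) : Int) = (T : Int) * (m : Int) + (j : Int) := by push_cast; ring
    simp [Function.comp, hc]

-- Enumeration: mapping the decoder over range(total) yields exactly the Cartesian product.
theorem pvEnum (L : List (List Int)) (hne : ∀ l ∈ L, l ≠ []) :
    (PySem.List.pyRange 0 (pvTotalB L) 1).map (pvDecodeB L) = pvProd L := by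
  induction L using List.reverseRecOn with
  | nil => decide
  | append_singleton L last ihL =>
    have hlast : last ≠ [] := hne last (by simp)
    have hm : 0 < last.length := List.length_pos_iff.mpr hlast
    have hT : pvTotalB (L ++ [last]) = (((L.map List.length).prod * last.length : Nat) : Int) := by
      rw [pvTotalB_eq]; simp
    rw [hT, pvRangeMul]
    have hstep : ∀ t j : Nat, j < last.length →
        pvDecodeB (L ++ [last]) ((t : Int) * (last.length : Int) + (j : Int))
          = pvDecodeB L ((t : Nat) : Int) ++ [last.getD j 0] := by
      intro t j hj
      rw [pvDecodeB_append]
      have hcast : (t : Int) * (last.length : Int) + (j : Int)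
          = ((t * last.length + j : Nat) : Int) := by push_cast; ring
      rw [hcast, PySem.Int.floordiv_natCast, PySem.Int.mod_natCast]
      have hdiv : (t * last.length + j) / last.length = t := by
        rw [Nat.add_comm, Nat.add_mul_div_right _ _ hm, Nat.div_eq_of_lt hj, Nat.zero_add]
      have hmod : (t * last.length + j) % last.length = j := by
        simp [Nat.mod_eq_of_lt hj]
      rw [hdiv, hmod, PySem.List.pyGet?_natCast]
      simp [List.getD]
    have hinner : ∀ t : Nat,
        (List.range last.length).map
            (fun j : Nat => pvDecodeB (L ++ [last]) ((t : Int) * (last.length : Int) + (j : Int)))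
          = last.map (fun v => pvDecodeB L ((t : Nat) : Int) ++ [v]) := by
      intro t
      have hc : ∀ j ∈ List.range last.length,
          pvDecodeB (L ++ [last]) ((t : Int) * (last.length : Int) + (j : Int))
            = ((fun v => pvDecodeB L ((t : Nat) : Int) ++ [v]) ∘ (fun j : Nat => last.getD j 0)) j := by
        intro j hj
        simpa [Function.comp] using hstep t j (List.mem_range.mp hj)
      rw [List.map_congr_left hc, ← List.map_map]
      congr 1
      apply List.ext_getElem
      · simp
      · intro i h1 h2
        simp [List.getD, List.getElem?_eq_getElem h2]
    simp only [hinner]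
    have hProdL : (List.range (L.map List.length).prod).map (fun t : Nat => pvDecodeB L ((t : Nat) : Int))
        = pvProd L := by
      have hP := ihL (fun l hl => hne l (by simp [hl]))
      rw [pvTotalB_eq, PySem.List.pyRange_zero_natCast, List.map_map] at hP
      simpa [Function.comp_def] using hP
    rw [← List.flatMap_map (fun t : Nat => pvDecodeB L ((t : Nat) : Int))
          (fun X => last.map (fun v => X ++ [v])), hProdL, pvProd_append]

-- ===== VERDICT (by name: the statement is the Claim_ definition above) =====
theorem get_repair_pairs_spec : Claim_equal_get_repair_pairs := by
  intro repair_list cp init_depth max_depth _ hpre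
  unfold Spec_get_repair_pairs get_repair_pairs get_repair_pairs_alt
  by_cases hlt : init_depth < max_depth
  · obtain ⟨hr0, hrest⟩ := hpre hlt
    have h1 := hr0.1
    have h2 := hr0.2
    have hin : ∀ k : Nat, k < (max_depth - init_depth).toNat →
        (∀ j : Nat, j < k → (PySem.List.pyGet? repair_list (init_depth + (j : Int))).getD [] ≠ []) →
        (PySem.List.pyGet? repair_list (init_depth + (k : Int))).isSome = true := by
      intro k hk hp
      rw [Option.isSome_iff_ne_none, ne_eq, PySem.List.pyGet?_eq_none_iff, not_not]
      by_cases hcase : init_depth + (k : Int) < (repair_list.length : Int)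
      · exact ⟨by omega, hcase⟩
      · exfalso
        have hlm : (repair_list.length : Int) < max_depth := by omega
        have hex : ∃ e : Int, init_depth ≤ e ∧ e < (repair_list.length : Int) ∧
            PySem.List.pyGet? repair_list e = some [] := by
          obtain ⟨hpos, hneg⟩ := hrest hlm
          by_cases hsign : init_depth < 0
          · obtain ⟨m, hm, hrlm⟩ := List.getElem_of_mem (hneg hsign)
            refine ⟨(m : Int), by omega, by omega, ?_⟩
            rw [PySem.List.pyGet?_natCast, List.getElem?_eq_getElem hm, hrlm]
          · obtain ⟨m, hm, hrlm⟩ := List.getElem_of_mem (hpos (by omega))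
            rw [List.length_drop] at hm
            rw [List.getElem_drop] at hrlm
            have hmlt : init_depth.toNat + m < repair_list.length := by omega
            refine ⟨((init_depth.toNat + m : Nat) : Int), by omega, by omega, ?_⟩
            rw [PySem.List.pyGet?_natCast, List.getElem?_eq_getElem hmlt, hrlm]
        obtain ⟨e, he1, he2, hsome⟩ := hex
        have hj : (e - init_depth).toNat < k := by omega
        have hpe := hp (e - init_depth).toNat hj
        rw [show init_depth + (((e - init_depth).toNat : Int)) = e by omega, hsome] at hpe
        exact hpe rfl
    rcases pvCoreAB repair_list (max_depth - init_depth).toNat init_depth hin with ⟨hL, hA⟩ | ⟨L, hL, hA, hne⟩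
    · rw [hL, pvGoA_map, hA]
      simp
    · rw [hL, pvGoA_map, hA, ← pvEnum L hne]
      simp [List.map_map, Function.comp_def]
  · have h0 : (max_depth - init_depth).toNat = 0 := by omega
    rw [h0]
    show pvGoA repair_list cp init_depth 0
        = match pvLevelsB repair_list init_depth [] 0 with
          | none => []
          | some none => []
          | some (some levels) =>
            (PySem.List.pyRange 0 (pvTotalB levels) 1).map (fun k => cp ++ pvDecodeB levels k)
    simp only [pvGoA, pvLevelsB]
    rw [show pvTotalB [] = ((1 : Nat) : Int) by rfl, PySem.List.pyRange_zero_natCast]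
    simp [pvDecodeB]
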